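-- pv_equiv track=rewrite | github.com/xNitix/ASD_AGH_2023 | tasks from the science club BIT/5/strings.py | graph_maker
-- ===== SOURCE A (Python) =====
-- class Node:
--     def __init__(self, idx):
--         self.indx = idx
--         self.parent = self
--
-- def findSet(x):
--     if x != x.parent:
--         x.parent = findSet(x.parent)
--     return x.parent
--
-- def union(x, y):
--     x = findSet(x)
--     y = findSet(y)
--
--     if x.indx < y.indx:
--         y.parent = x
--
--     elif y.indx < x.indx:
--         x.parent = y
--
--     else:
--         x.parent = y
--
-- def Kruskal(edges,n):
--     edges.sort(key=lambda x: x[0])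
--
--     MST = []
--     sets = [Node(i) for i in range(n)]
--
--     for edge, u, v in edges:
--         if findSet(sets[ord(u)-97]) != findSet(sets[ord(v)-97]):
--             MST.append((edge, u, v))
--             union(sets[ord(u)-97], sets[ord(v)-97])
--
--     return sets
--
-- def graph_maker(A,B,C):
--     n = len(A)
--     edges = []
--     for i in range(n):
--         edges.append([1,A[i],B[i]])
--
--     mst = Kruskal(edges,27)
--
--     new = ""
--
--     for i in range(len(C)):
--         l = C[i]
--         new += chr(findSet(mst[ord(l)-97]).indx + 97)
--
--     return new
-- ===== SOURCE B (Python) =====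
-- def graph_maker(A, B, C):
--     # merge-by-relabeling over 27 fixed node slots instead of union-find
--     labels = list(range(27))
--     for i in range(len(A)):
--         a = labels[ord(A[i]) - 97]
--         b = labels[ord(B[i]) - 97]
--         m = a if a < b else b
--         labels = [m if x == a or x == b else x for x in labels]
--     return "".join(chr(labels[ord(ch) - 97] + 97) for ch in C)
-- ===== Notes on version B (the rewrite author's own statement) =====
-- stated objective: simpler
-- what changed: Replaces the sort + union-find-with-path-compression Kruskal machinery with a single pass that merges component labels by relabeling a fixed 27-slot array (each char then reads its component minimum directly).
import Mathlib
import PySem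

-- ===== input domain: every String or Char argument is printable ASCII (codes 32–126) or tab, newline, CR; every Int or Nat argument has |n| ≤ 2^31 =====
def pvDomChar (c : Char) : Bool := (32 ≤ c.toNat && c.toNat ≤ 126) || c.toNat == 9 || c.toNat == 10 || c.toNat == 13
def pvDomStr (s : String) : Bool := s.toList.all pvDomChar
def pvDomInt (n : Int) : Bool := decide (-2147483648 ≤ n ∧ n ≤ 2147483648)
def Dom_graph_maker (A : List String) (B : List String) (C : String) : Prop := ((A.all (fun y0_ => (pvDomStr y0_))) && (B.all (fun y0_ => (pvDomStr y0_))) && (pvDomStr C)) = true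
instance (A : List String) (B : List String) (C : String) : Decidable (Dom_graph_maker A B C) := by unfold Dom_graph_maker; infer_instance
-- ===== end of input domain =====

-- B replaces A's sort + union-find (path compression) Kruskal machinery by a single
-- pass that merges component labels by relabeling a fixed 27-slot array (objective: simpler).


-- ===== PORT A =====
-- shared index helper: `ord(s) - 97` used as an index into a length-27 Python list.
-- Exact (Python's negative-index wrap) whenever 70 ≤ ord(s) ≤ 123, which Pre_ guarantees;
-- outside Pre_ Python raises (TypeError/IndexError) and this returns a default.
def pvOrdIdxC (c : Char) : Nat := (((c.toNat : Int) - 97) % 27).toNat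

def pvOrdIdx (s : String) : Nat :=
  match s.toList with
  | [c] => pvOrdIdxC c
  | _ => 0

-- the forest of 27 Nodes is modelled by the list of parent INDICES (Node identity = index);
-- findSet takes fuel (27 ≥ any parent-chain length); path compression is the `.set i r`.
def pvFindSet : Nat → List Nat → Nat → Nat × List Nat
  | 0, p, i => (i, p)
  | f+1, p, i =>
    let pi := p.getD i 0
    if pi = i then (i, p)
    else
      let r := pvFindSet f p pi
      (r.1, r.2.set i r.1)

def pvUnion (p : List Nat) (i j : Nat) : List Nat :=
  let x := pvFindSet 27 p i
  let y := pvFindSet 27 x.2 j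
  if x.1 < y.1 then y.2.set y.1 x.1
  else if y.1 < x.1 then y.2.set x.1 y.1
  else y.2.set x.1 y.1

-- Kruskal's loop; the MST list A builds is dead for the returned value and is not carried.
def pvKruskalLoop : List (Int × String × String) → List Nat → List Nat
  | [], p => p
  | (_, u, v) :: rest, p =>
    let x := pvFindSet 27 p (pvOrdIdx u)
    let y := pvFindSet 27 x.2 (pvOrdIdx v)
    if x.1 ≠ y.1 then pvKruskalLoop rest (pvUnion y.2 (pvOrdIdx u) (pvOrdIdx v))
    else pvKruskalLoop rest y.2

def pvKruskal (edges : List (Int × String × String)) (n : Nat) : List Nat :=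
  pvKruskalLoop (PySem.List.sorted edges (fun e => e.1) false) (List.range n)

def pvCLoop : List Nat → List Char → String → String
  | _, [], acc => acc
  | p, c :: rest, acc =>
    let r := pvFindSet 27 p (pvOrdIdxC c)
    pvCLoop r.2 rest (acc ++ String.ofList [Char.ofNat (r.1 + 97)])

def graph_maker (A : List String) (B : List String) (C : String) : String :=
  let edges := (List.range A.length).map (fun i => ((1 : Int), A.getD i "", B.getD i ""))
  let mst := pvKruskal edges 27
  pvCLoop mst C.toList ""

-- ===== PORT B =====
def pvRelabelStep (labels : List Nat) (u v : String) : List Nat :=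
  let a := labels.getD (pvOrdIdx u) 0
  let b := labels.getD (pvOrdIdx v) 0
  let m := if a < b then a else b
  labels.map (fun x => if x = a ∨ x = b then m else x)

def graph_maker_alt (A : List String) (B : List String) (C : String) : String :=
  let labels := (List.range A.length).foldl
    (fun ls i => pvRelabelStep ls (A.getD i "") (B.getD i "")) (List.range 27)
  String.ofList (C.toList.map (fun c => Char.ofNat (labels.getD (pvOrdIdxC c) 0 + 97)))

-- ===== PRECONDITION & SPEC =====
def pvOkStr (s : String) : Bool :=
  match s.toList with
  | [c] => 70 ≤ c.toNat && c.toNat ≤ 123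
  | _ => false

-- Pre_ = exactly where the Python A returns: it needs B[i] for every i < len(A)
-- (else IndexError), and every used string (A[i], B[i], each char of C) must be a single
-- char (else ord raises TypeError) with code in [70,123] so that ord(·)-97 lies in
-- [-27,26], a valid (possibly negative, wrapping) index into the 27-slot list
-- (else IndexError).  Entries of B beyond len(A) are unused and unconstrained.
def Pre_graph_maker (A : List String) (B : List String) (C : String) : Prop :=
  A.length ≤ B.length ∧ (A.all pvOkStr ∧ (B.take A.length).all pvOkStr ∧ C.toList.all (fun c => 70 ≤ c.toNat && c.toNat ≤ 123)) = true
instance (A : List String) (B : List String) (C : String) : Decidable (Pre_graph_maker A B C) := by unfold Pre_graph_maker; infer_instance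

def pvWitness_graph_maker : List String × List String × String := (["a", "b"], ["b", "c"], "cad")

def Spec_graph_maker (A : List String) (B : List String) (C : String) (out : String) : Prop := out = graph_maker_alt A B C
instance (A : List String) (B : List String) (C : String) (out : String) : Decidable (Spec_graph_maker A B C out) := by unfold Spec_graph_maker; infer_instance

-- ===== CLAIM (what is proved, stated in full; the proofs are below) =====
def Claim_equal_graph_maker : Prop := ∀ (A : List String) (B : List String) (C : String), Dom_graph_maker A B C → Pre_graph_maker A B C → Spec_graph_maker A B C (graph_maker A B C)

-- ===== LEMMAS AND PROOFS =====

-- root of i in the parent forest p (fuel 27 suffices: parent chains strictly decrease)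
def pvRootN : Nat → List Nat → Nat → Nat
  | 0, _, i => i
  | f+1, p, i => let pi := p.getD i 0; if pi = i then i else pvRootN f p pi

def pvRoot (p : List Nat) (i : Nat) : Nat := pvRootN 27 p i

-- forest invariant: 27 slots, every parent index ≤ its node's index
def pvInv (p : List Nat) : Prop := p.length = 27 ∧ ∀ i, i < 27 → p.getD i 0 ≤ i

-- simulation relation: labels.getD j = pvRoot p j on all 27 slots
def pvSim (p labels : List Nat) : Prop :=
  labels.length = 27 ∧ ∀ j, j < 27 → labels.getD j 0 = pvRoot p j

theorem pvOrdIdxC_lt (c : Char) : pvOrdIdxC c < 27 := by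
  unfold pvOrdIdxC
  have h1 : (0:Int) ≤ ((c.toNat : Int) - 97) % 27 := Int.emod_nonneg _ (by norm_num)
  have h2 : ((c.toNat : Int) - 97) % 27 < 27 := Int.emod_lt_of_pos _ (by norm_num)
  omega

theorem pvOrdIdx_lt (s : String) : pvOrdIdx s < 27 := by
  unfold pvOrdIdx
  rcases s.toList with _ | ⟨c, _ | t⟩ <;> simp [pvOrdIdxC_lt]

theorem getD_set_self (p : List Nat) (i r : Nat) (h : i < p.length) :
    (p.set i r).getD i 0 = r := by
  simp [List.getD, h]

theorem getD_set_ne (p : List Nat) (i j r : Nat) (h : j ≠ i) :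
    (p.set i r).getD j 0 = p.getD j 0 := by
  simp [List.getD, List.getElem?_set_ne (by omega : i ≠ j)]

theorem getD_map_lt (l : List Nat) (f : Nat → Nat) (j : Nat) (h : j < l.length) :
    (l.map f).getD j 0 = f (l.getD j 0) := by
  simp [List.getD, List.getElem?_eq_getElem h]

-- zeta-reduced characterizations of the let-bound port bodies (all definitional)
theorem pvUnion_eq (p : List Nat) (i j : Nat) :
    pvUnion p i j =
      if (pvFindSet 27 p i).1 < (pvFindSet 27 (pvFindSet 27 p i).2 j).1 then
        (pvFindSet 27 (pvFindSet 27 p i).2 j).2.set (pvFindSet 27 (pvFindSet 27 p i).2 j).1 (pvFindSet 27 p i).1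
      else if (pvFindSet 27 (pvFindSet 27 p i).2 j).1 < (pvFindSet 27 p i).1 then
        (pvFindSet 27 (pvFindSet 27 p i).2 j).2.set (pvFindSet 27 p i).1 (pvFindSet 27 (pvFindSet 27 p i).2 j).1
      else
        (pvFindSet 27 (pvFindSet 27 p i).2 j).2.set (pvFindSet 27 p i).1 (pvFindSet 27 (pvFindSet 27 p i).2 j).1 := rfl

theorem pvKruskalLoop_one (w : Int) (u v : String) (p : List Nat) :
    pvKruskalLoop [(w, u, v)] p =
      if (pvFindSet 27 p (pvOrdIdx u)).1 ≠ (pvFindSet 27 (pvFindSet 27 p (pvOrdIdx u)).2 (pvOrdIdx v)).1 then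
        pvUnion (pvFindSet 27 (pvFindSet 27 p (pvOrdIdx u)).2 (pvOrdIdx v)).2 (pvOrdIdx u) (pvOrdIdx v)
      else (pvFindSet 27 (pvFindSet 27 p (pvOrdIdx u)).2 (pvOrdIdx v)).2 := rfl

theorem pvKruskalLoop_cons_eq (w : Int) (u v : String) (rest : List (Int × String × String)) (p : List Nat) :
    pvKruskalLoop ((w, u, v) :: rest) p =
      if (pvFindSet 27 p (pvOrdIdx u)).1 ≠ (pvFindSet 27 (pvFindSet 27 p (pvOrdIdx u)).2 (pvOrdIdx v)).1 then
        pvKruskalLoop rest (pvUnion (pvFindSet 27 (pvFindSet 27 p (pvOrdIdx u)).2 (pvOrdIdx v)).2 (pvOrdIdx u) (pvOrdIdx v))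
      else pvKruskalLoop rest (pvFindSet 27 (pvFindSet 27 p (pvOrdIdx u)).2 (pvOrdIdx v)).2 := rfl

theorem pvKruskalLoop_cons (w : Int) (u v : String) (rest : List (Int × String × String)) (p : List Nat) :
    pvKruskalLoop ((w, u, v) :: rest) p = pvKruskalLoop rest (pvKruskalLoop [(w, u, v)] p) := by
  rw [pvKruskalLoop_cons_eq, pvKruskalLoop_one]
  split_ifs <;> rfl

theorem pvRelabelStep_eq (labels : List Nat) (u v : String) :
    pvRelabelStep labels u v =
      labels.map (fun x =>
        if x = labels.getD (pvOrdIdx u) 0 ∨ x = labels.getD (pvOrdIdx v) 0 then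
          (if labels.getD (pvOrdIdx u) 0 < labels.getD (pvOrdIdx v) 0 then
            labels.getD (pvOrdIdx u) 0 else labels.getD (pvOrdIdx v) 0)
        else x) := rfl

theorem pvCLoop_cons_eq (p : List Nat) (c : Char) (rest : List Char) (acc : String) :
    pvCLoop p (c :: rest) acc =
      pvCLoop (pvFindSet 27 p (pvOrdIdxC c)).2 rest
        (acc ++ String.ofList [Char.ofNat ((pvFindSet 27 p (pvOrdIdxC c)).1 + 97)]) := rfl

theorem pvRootN_stable (p : List Nat) (hp : pvInv p) :
    ∀ i, i < 27 → ∀ f g, i < f → i < g → pvRootN f p i = pvRootN g p i := by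
  intro i
  induction i using Nat.strong_induction_on with
  | _ i ih =>
    intro hi f g hf hg
    match f, g with
    | f'+1, g'+1 =>
      simp only [pvRootN]
      by_cases h : p.getD i 0 = i
      · rw [if_pos h, if_pos h]
      · have hle := hp.2 i hi
        have hlt : p.getD i 0 < i := by omega
        rw [if_neg h, if_neg h]
        exact ih _ hlt (by omega) f' g' (by omega) (by omega)

theorem pvRoot_unfold (p : List Nat) (hp : pvInv p) (i : Nat) (hi : i < 27) :
    pvRoot p i = if p.getD i 0 = i then i else pvRoot p (p.getD i 0) := by
  show pvRootN 27 p i = _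
  rw [show (27:Nat) = 26+1 from rfl, pvRootN]
  by_cases h : p.getD i 0 = i
  · rw [if_pos h, if_pos h]
  · have hle := hp.2 i hi
    have hlt : p.getD i 0 < i := by omega
    rw [if_neg h, if_neg h]
    exact pvRootN_stable p hp _ (by omega) 26 27 (by omega) (by omega)

theorem pvRoot_le (p : List Nat) (hp : pvInv p) :
    ∀ i, i < 27 → pvRoot p i ≤ i := by
  intro i
  induction i using Nat.strong_induction_on with
  | _ i ih =>
    intro hi
    rw [pvRoot_unfold p hp i hi]
    by_cases h : p.getD i 0 = i
    · rw [if_pos h]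
    · have hle := hp.2 i hi
      have hlt : p.getD i 0 < i := by omega
      rw [if_neg h]
      exact le_trans (ih _ hlt (by omega)) (by omega)

theorem pvRoot_lt (p : List Nat) (hp : pvInv p) (i : Nat) (hi : i < 27) :
    pvRoot p i < 27 := lt_of_le_of_lt (pvRoot_le p hp i hi) hi

theorem pvRoot_fix (p : List Nat) (hp : pvInv p) :
    ∀ i, i < 27 → p.getD (pvRoot p i) 0 = pvRoot p i := by
  intro i
  induction i using Nat.strong_induction_on with
  | _ i ih =>
    intro hi
    rw [pvRoot_unfold p hp i hi]
    by_cases h : p.getD i 0 = i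
    · rw [if_pos h]; exact h
    · have hle := hp.2 i hi
      have hlt : p.getD i 0 < i := by omega
      rw [if_neg h]
      exact ih _ hlt (by omega)

theorem pvRoot_of_fix (p : List Nat) (hp : pvInv p) (i : Nat) (hi : i < 27)
    (h : p.getD i 0 = i) : pvRoot p i = i := by
  rw [pvRoot_unfold p hp i hi, if_pos h]

theorem pvRoot_root (p : List Nat) (hp : pvInv p) (i : Nat) (hi : i < 27) :
    pvRoot p (pvRoot p i) = pvRoot p i :=
  pvRoot_of_fix p hp _ (pvRoot_lt p hp i hi) (pvRoot_fix p hp i hi)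

theorem pvInv_set (p : List Nat) (hp : pvInv p) (i r : Nat) (hi : i < 27) (hr : r ≤ i) :
    pvInv (p.set i r) := by
  refine ⟨by simp [hp.1], ?_⟩
  intro j hj
  by_cases h : j = i
  · rw [h, getD_set_self p i r (by rw [hp.1]; omega)]; exact h ▸ hr
  · rw [getD_set_ne p i j r h]; exact hp.2 j hj

-- path compression step: overwriting p[i] with root(p,i) changes no root
theorem pvRoot_set_root (p : List Nat) (hp : pvInv p) (i : Nat) (hi : i < 27) :
    ∀ j, j < 27 → pvRoot (p.set i (pvRoot p i)) j = pvRoot p j := by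
  have hq : pvInv (p.set i (pvRoot p i)) :=
    pvInv_set p hp i (pvRoot p i) hi (pvRoot_le p hp i hi)
  intro j
  induction j using Nat.strong_induction_on with
  | _ j ih =>
    intro hj
    rw [pvRoot_unfold _ hq j hj]
    by_cases hji : j = i
    · rw [hji, getD_set_self p i _ (by rw [hp.1]; omega)]
      by_cases hr : pvRoot p i = i
      · rw [if_pos hr]; exact hr.symm
      · rw [if_neg hr]
        have hlt : pvRoot p i < i := lt_of_le_of_ne (pvRoot_le p hp i hi) hr
        rw [ih _ (hji ▸ hlt) (by omega), pvRoot_root p hp i hi]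
    · rw [getD_set_ne p i j _ hji]
      by_cases h : p.getD j 0 = j
      · rw [if_pos h, pvRoot_of_fix p hp j hj h]
      · have hle := hp.2 j hj
        have hlt : p.getD j 0 < j := by omega
        rw [if_neg h, ih _ hlt (by omega), pvRoot_unfold p hp j hj, if_neg h]

-- linking root b under root a (a < b) redirects exactly the class of b
theorem pvRoot_link (p : List Nat) (hp : pvInv p) (a b : Nat)
    (ha : a < 27) (hb : b < 27) (hfa : p.getD a 0 = a) (hfb : p.getD b 0 = b)
    (hab : a < b) :
    ∀ j, j < 27 → pvRoot (p.set b a) j = if pvRoot p j = b then a else pvRoot p j := by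
  have hq : pvInv (p.set b a) := pvInv_set p hp b a hb (by omega)
  intro j
  induction j using Nat.strong_induction_on with
  | _ j ih =>
    intro hj
    rw [pvRoot_unfold _ hq j hj]
    by_cases hjb : j = b
    · rw [hjb, getD_set_self p b a (by rw [hp.1]; omega)]
      rw [if_neg (by omega), ih a (hjb ▸ hab) ha, pvRoot_of_fix p hp a ha hfa,
        if_neg (by omega), pvRoot_of_fix p hp b hb hfb, if_pos rfl]
    · rw [getD_set_ne p b j a hjb]
      by_cases h : p.getD j 0 = j
      · rw [if_pos h, pvRoot_of_fix p hp j hj h, if_neg hjb]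
      · have hle := hp.2 j hj
        have hlt : p.getD j 0 < j := by omega
        rw [if_neg h, ih _ hlt (by omega), pvRoot_unfold p hp j hj, if_neg h]

theorem pvFindSet_spec : ∀ (i f : Nat) (p : List Nat), pvInv p → i < 27 → i < f →
    (pvFindSet f p i).1 = pvRoot p i ∧ pvInv (pvFindSet f p i).2 ∧
      ∀ j, j < 27 → pvRoot (pvFindSet f p i).2 j = pvRoot p j := by
  intro i
  induction i using Nat.strong_induction_on with
  | _ i ih =>
    intro f p hp hi hf
    match f with
    | f'+1 =>
      simp only [pvFindSet]
      by_cases h : p.getD i 0 = i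
      · rw [if_pos h]
        exact ⟨by rw [pvRoot_of_fix p hp i hi h], hp, fun j hj => rfl⟩
      · have hle := hp.2 i hi
        have hlt : p.getD i 0 < i := by omega
        obtain ⟨h1, h2, h3⟩ := ih _ hlt f' p hp (by omega) (by omega)
        rw [if_neg h]
        have hri : pvRoot p (p.getD i 0) = pvRoot p i := by
          rw [pvRoot_unfold p hp i hi, if_neg h]
        have hrq : (pvFindSet f' p (p.getD i 0)).1
            = pvRoot (pvFindSet f' p (p.getD i 0)).2 i := by
          rw [h1, h3 i hi, hri]
        refine ⟨by rw [h1, hri], ?_, ?_⟩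
        · rw [hrq]
          exact pvInv_set _ h2 i _ hi (pvRoot_le _ h2 i hi)
        · intro j hj
          rw [hrq, pvRoot_set_root _ h2 i hi j hj, h3 j hj]

-- one union vs one relabeling: roots transform identically
theorem pvUnion_spec (p : List Nat) (hp : pvInv p) (iu iv : Nat)
    (hu : iu < 27) (hv : iv < 27) (hne : pvRoot p iu ≠ pvRoot p iv) :
    pvInv (pvUnion p iu iv) ∧ ∀ j, j < 27 →
      pvRoot (pvUnion p iu iv) j =
        if pvRoot p j = pvRoot p iu ∨ pvRoot p j = pvRoot p iv then
          (if pvRoot p iu < pvRoot p iv then pvRoot p iu else pvRoot p iv)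
        else pvRoot p j := by
  obtain ⟨x1, x2, x3⟩ := pvFindSet_spec iu 27 p hp hu (by omega)
  obtain ⟨y1, y2, y3⟩ := pvFindSet_spec iv 27 (pvFindSet 27 p iu).2 x2 hv (by omega)
  have hrv : (pvFindSet 27 (pvFindSet 27 p iu).2 iv).1 = pvRoot p iv := by
    rw [y1, x3 _ hv]
  have hr2 : ∀ j, j < 27 →
      pvRoot (pvFindSet 27 (pvFindSet 27 p iu).2 iv).2 j = pvRoot p j :=
    fun j hj => by rw [y3 j hj, x3 j hj]
  have hru27 : pvRoot p iu < 27 := pvRoot_lt p hp iu hu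
  have hrv27 : pvRoot p iv < 27 := pvRoot_lt p hp iv hv
  have hfixu : (pvFindSet 27 (pvFindSet 27 p iu).2 iv).2.getD (pvRoot p iu) 0 = pvRoot p iu := by
    have := pvRoot_fix _ y2 iu hu
    rwa [hr2 iu hu] at this
  have hfixv : (pvFindSet 27 (pvFindSet 27 p iu).2 iv).2.getD (pvRoot p iv) 0 = pvRoot p iv := by
    have := pvRoot_fix _ y2 iv hv
    rwa [hr2 iv hv] at this
  rw [pvUnion_eq, x1, hrv]
  by_cases hlt : pvRoot p iu < pvRoot p iv
  · rw [if_pos hlt]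
    have hlink := pvRoot_link _ y2 _ _ hru27 hrv27 hfixu hfixv hlt
    refine ⟨pvInv_set _ y2 _ _ hrv27 (by omega), ?_⟩
    intro j hj
    rw [hlink j hj, hr2 j hj, if_pos hlt]
    by_cases h1 : pvRoot p j = pvRoot p iv
    · simp [h1, Ne.symm hne]
    · by_cases h2 : pvRoot p j = pvRoot p iu <;> simp [h1, h2]
  · have hgt : pvRoot p iv < pvRoot p iu := by omega
    rw [if_neg hlt, if_pos hgt]
    have hlink := pvRoot_link _ y2 _ _ hrv27 hru27 hfixv hfixu hgt
    refine ⟨pvInv_set _ y2 _ _ hru27 (by omega), ?_⟩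
    intro j hj
    rw [hlink j hj, hr2 j hj, if_neg hlt]
    by_cases h1 : pvRoot p j = pvRoot p iu
    · simp [h1, hne]
    · by_cases h2 : pvRoot p j = pvRoot p iv <;> simp [h1, h2]

theorem pvStep_sim (p labels : List Nat) (hp : pvInv p) (hs : pvSim p labels)
    (u v : String) :
    pvInv (pvKruskalLoop [((1:Int), u, v)] p) ∧
      pvSim (pvKruskalLoop [((1:Int), u, v)] p) (pvRelabelStep labels u v) := by
  have hu := pvOrdIdx_lt u
  have hv := pvOrdIdx_lt v
  obtain ⟨x1, x2, x3⟩ := pvFindSet_spec (pvOrdIdx u) 27 p hp hu (by omega)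
  obtain ⟨y1, y2, y3⟩ :=
    pvFindSet_spec (pvOrdIdx v) 27 (pvFindSet 27 p (pvOrdIdx u)).2 x2 hv (by omega)
  have hrv : (pvFindSet 27 (pvFindSet 27 p (pvOrdIdx u)).2 (pvOrdIdx v)).1
      = pvRoot p (pvOrdIdx v) := by rw [y1, x3 _ hv]
  have hr2 : ∀ j, j < 27 →
      pvRoot (pvFindSet 27 (pvFindSet 27 p (pvOrdIdx u)).2 (pvOrdIdx v)).2 j = pvRoot p j :=
    fun j hj => by rw [y3 j hj, x3 j hj]
  rw [pvKruskalLoop_one, pvRelabelStep_eq, x1, hrv]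
  simp only [hs.2 _ hu, hs.2 _ hv]
  by_cases hne : pvRoot p (pvOrdIdx u) = pvRoot p (pvOrdIdx v)
  · rw [if_neg (by simpa using hne)]
    refine ⟨y2, by rw [List.length_map, hs.1], ?_⟩
    intro j hj
    rw [getD_map_lt labels _ j (by rw [hs.1]; omega), hs.2 j hj, hr2 j hj, hne]
    by_cases h : pvRoot p j = pvRoot p (pvOrdIdx v)
    · simp [h]
    · simp [h]
  · rw [if_pos hne]
    obtain ⟨hq, hroots⟩ := pvUnion_spec _ y2 (pvOrdIdx u) (pvOrdIdx v) hu hv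
      (by rw [hr2 _ hu, hr2 _ hv]; exact hne)
    refine ⟨hq, by rw [List.length_map, hs.1], ?_⟩
    intro j hj
    rw [getD_map_lt labels _ j (by rw [hs.1]; omega), hs.2 j hj,
      hroots j hj, hr2 _ hu, hr2 _ hv, hr2 j hj]

theorem pvLoop_sim (A B : List String) :
    ∀ (l : List Nat) (p labels : List Nat), pvInv p → pvSim p labels →
    pvInv (pvKruskalLoop (l.map (fun i => ((1:Int), A.getD i "", B.getD i ""))) p) ∧
      pvSim (pvKruskalLoop (l.map (fun i => ((1:Int), A.getD i "", B.getD i ""))) p)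
        (l.foldl (fun ls i => pvRelabelStep ls (A.getD i "") (B.getD i "")) labels) := by
  intro l
  induction l with
  | nil => intro p labels hp hs; exact ⟨hp, hs⟩
  | cons i t ih =>
    intro p labels hp hs
    simp only [List.map_cons, List.foldl_cons]
    rw [pvKruskalLoop_cons]
    obtain ⟨hp2, hs2⟩ := pvStep_sim p labels hp hs (A.getD i "") (B.getD i "")
    exact ih _ _ hp2 hs2

theorem pvCLoop_spec : ∀ (cs : List Char) (p : List Nat) (acc : String), pvInv p →
    pvCLoop p cs acc =
      acc ++ String.ofList (cs.map (fun c => Char.ofNat (pvRoot p (pvOrdIdxC c) + 97))) := by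
  intro cs
  induction cs with
  | nil =>
    intro p acc _
    show acc = acc ++ String.ofList []
    rw [String.append_eq_left_iff.mpr rfl]
  | cons c rest ih =>
    intro p acc hp
    have hc := pvOrdIdxC_lt c
    obtain ⟨h1, h2, h3⟩ := pvFindSet_spec (pvOrdIdxC c) 27 p hp hc (by omega)
    rw [pvCLoop_cons_eq, ih _ _ h2, h1]
    have hmap : rest.map (fun c2 => Char.ofNat
        (pvRoot (pvFindSet 27 p (pvOrdIdxC c)).2 (pvOrdIdxC c2) + 97))
        = rest.map (fun c2 => Char.ofNat (pvRoot p (pvOrdIdxC c2) + 97)) :=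
      List.map_congr_left (fun c2 _ => by rw [h3 _ (pvOrdIdxC_lt c2)])
    rw [hmap, String.append_assoc, ← String.ofList_append]
    rfl

theorem pairwise_const {α : Type} (l : List α) (R : α → α → Prop) (h : ∀ a b, R a b) :
    l.Pairwise R := by
  induction l with
  | nil => exact .nil
  | cons a t ih => exact .cons (fun b _ => h a b) ih

theorem pvInit_inv : pvInv (List.range 27) := by
  refine ⟨by simp, ?_⟩
  intro i hi
  rw [List.getD_eq_getElem (List.range 27) 0 (by simpa using hi)]
  simp

theorem pvInit_fix (j : Nat) (hj : j < 27) : (List.range 27).getD j 0 = j := by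
  rw [List.getD_eq_getElem (List.range 27) 0 (by simpa using hj)]
  simp

theorem pvInit_sim : pvSim (List.range 27) (List.range 27) := by
  refine ⟨by simp, ?_⟩
  intro j hj
  rw [pvInit_fix j hj, pvRoot_of_fix (List.range 27) pvInit_inv j hj (pvInit_fix j hj)]

-- ===== VERDICT (by name: the statement is the Claim_ definition above) =====
theorem graph_maker_spec : Claim_equal_graph_maker := by
  intro A B C _ _
  simp only [Spec_graph_maker, graph_maker, graph_maker_alt, pvKruskal]
  have hsorted :
      PySem.List.sorted ((List.range A.length).map (fun i => ((1 : Int), A.getD i "", B.getD i ""))) (fun e => e.1) false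
        = (List.range A.length).map (fun i => ((1 : Int), A.getD i "", B.getD i "")) := by
    apply PySem.List.sorted_eq_self_of_pairwise
    apply List.Pairwise.map
    exact fun a b h => h
    exact pairwise_const _ _ (fun a b => le_refl (1:Int))
  rw [hsorted]
  obtain ⟨hp, hsim⟩ :=
    pvLoop_sim A B (List.range A.length) (List.range 27) (List.range 27) pvInit_inv pvInit_sim
  rw [pvCLoop_spec C.toList _ "" hp, String.empty_append]
  congr 1
  apply List.map_congr_left
  intro c _
  rw [hsim.2 (pvOrdIdxC c) (pvOrdIdxC_lt c)]
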